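-- pv_equiv track=rewrite | github.com/pervanne69/oop | project5/main.py | get_own_count
-- ===== SOURCE A (Python) =====
-- def get_own_count(array: list[int]) -> int:
--     """
--     The function calculating amount of team's own numbers.
--     :param: array (list[int]) - The sorted list.
--     :return: (int) - count of team's own numbers.
--     """
--     index = 0
--     count = 0
--     length = len(array)
--     while index < length - 2:
--         if array[index] == array[index + 1] == array[index + 2]:
--             count += 1
--             index += 3
--         elif array[index] == array[index + 1] != array[index + 2]:
--             index += 2
--         elif array[index] != array[index + 1]:
--             index += 1
--     return count
-- ===== SOURCE B (Python) =====
-- def get_own_count(array: list[int]) -> int: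
--     """Count floor(run/3) over maximal runs of consecutive equal elements, in one pass."""
--     total = 0
--     run = 0
--     prev = None
--     for x in array:
--         if run > 0 and x == prev:
--             run += 1
--         else:
--             total += run // 3
--             run = 1
--             prev = x
--     return total + run // 3
-- ===== Notes on version B (the rewrite author's own statement) =====
-- stated objective: simpler
-- what changed: Replaced the index-jumping while loop (steps of 1/2/3 over a triple-comparison case analysis with repeated subscripting) by a single for-loop over the elements that tracks the length of the current run of equal values and sums run // 3 per run.
import Mathlib
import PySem

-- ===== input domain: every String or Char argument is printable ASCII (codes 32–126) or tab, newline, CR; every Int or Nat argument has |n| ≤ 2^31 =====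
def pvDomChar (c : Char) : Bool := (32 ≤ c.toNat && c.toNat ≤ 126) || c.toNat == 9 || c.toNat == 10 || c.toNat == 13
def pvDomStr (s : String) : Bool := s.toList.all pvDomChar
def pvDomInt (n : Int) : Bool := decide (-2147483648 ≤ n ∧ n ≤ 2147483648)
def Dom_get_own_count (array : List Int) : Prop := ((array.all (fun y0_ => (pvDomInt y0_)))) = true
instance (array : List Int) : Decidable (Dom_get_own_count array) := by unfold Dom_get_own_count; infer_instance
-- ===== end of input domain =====

-- B replaces A's index-jumping while loop by a one-pass run-length scan summing run // 3 per run (objective: simpler).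

-- ===== PORT A =====
-- the while loop of A: index advances by 3 / 2 / 1 according to the triple comparison.
-- The final 'else => count' branches are unreachable (the three Python conditions are exhaustive
-- and, with 0 ≤ index < length - 2, every indexing succeeds).
def pvLoopA (array : List Int) (index count : Int) : Int :=
  if index < (array.length : Int) - 2 then
    match PySem.List.pyGet? array index, PySem.List.pyGet? array (index + 1),
          PySem.List.pyGet? array (index + 2) with
    | some a, some b, some c =>
      if a = b ∧ b = c then pvLoopA array (index + 3) (count + 1)
      else if a = b ∧ b ≠ c then pvLoopA array (index + 2) count
      else if a ≠ b then pvLoopA array (index + 1) count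
      else count
    | _, _, _ => count
  else count
termination_by ((array.length : Int) - index).toNat
decreasing_by all_goals omega

def get_own_count (array : List Int) : Int :=
  pvLoopA array 0 0

-- ===== PORT B =====
-- state: (total, run, prev); run = length of the current run of equal elements
def get_own_count_alt (array : List Int) : Int :=
  let s := array.foldl
    (fun (st : Int × Int × Option Int) x =>
      if st.2.1 > 0 ∧ some x = st.2.2 then (st.1, st.2.1 + 1, st.2.2)
      else (st.1 + PySem.Int.floordiv st.2.1 3, 1, some x))
    ((0 : Int), (0 : Int), (none : Option Int))
  s.1 + PySem.Int.floordiv s.2.1 3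

-- ===== PRECONDITION & SPEC =====
def Spec_get_own_count (array : List Int) (out : Int) : Prop := out = get_own_count_alt array
instance (array : List Int) (out : Int) : Decidable (Spec_get_own_count array out) := by unfold Spec_get_own_count; infer_instance

-- ===== CLAIM (what is proved, stated in full; the proofs are below) =====
def Claim_equal_get_own_count : Prop := ∀ (array : List Int), Dom_get_own_count array → Spec_get_own_count array (get_own_count array)

-- ===== LEMMAS AND PROOFS =====

-- reference function: count of triples, consuming runs from the front
def pvCnt : List Int → Int
  | a :: b :: c :: rest =>
    if a = b ∧ b = c then 1 + pvCnt rest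
    else if a = b then pvCnt (c :: rest)
    else pvCnt (b :: c :: rest)
  | _ => 0

lemma pvCnt_short (xs : List Int) (h : xs.length ≤ 2) : pvCnt xs = 0 := by
  match xs with
  | [] => rfl
  | [a] => rfl
  | [a, b] => rfl
  | a :: b :: c :: rest => simp at h

lemma pvFloor3 (r : Nat) : PySem.Int.floordiv (r : Int) 3 = ((r / 3 : Nat) : Int) := by
  exact_mod_cast PySem.Int.floordiv_natCast r 3

-- a maximal run of length r contributes r / 3
lemma pvCnt_run (r : Nat) : ∀ (v : Int) (ys : List Int),
    (∀ y, ys.head? = some y → y ≠ v) →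
    pvCnt (List.replicate r v ++ ys) = ((r / 3 : Nat) : Int) + pvCnt ys := by
  induction r using Nat.strong_induction_on with
  | _ r ih =>
    intro v ys hy
    match r with
    | 0 => simp
    | 1 =>
      match ys with
      | [] => simp [pvCnt]
      | [y] => simp [pvCnt]
      | y :: z :: ys' =>
        have hyv : y ≠ v := hy y (by simp)
        have h1 : ¬ (v = y ∧ y = z) := fun h => hyv h.1.symm
        have h2 : ¬ v = y := fun h => hyv h.symm
        simp [pvCnt, h2]
    | 2 =>
      match ys with
      | [] => simp [pvCnt]
      | y :: ys' =>
        have hyv : y ≠ v := hy y (by simp)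
        have h2 : ¬ v = y := fun h => hyv h.symm
        simp [pvCnt, h2]
    | (m + 3) =>
      have hrep : List.replicate (m + 3) v ++ ys = v :: v :: v :: (List.replicate m v ++ ys) := by
        simp [List.replicate_succ]
      rw [hrep]
      have hm := ih m (by omega) v ys hy
      have h3 : (m + 3) / 3 = m / 3 + 1 := by omega
      have hstep : pvCnt (v :: v :: v :: (List.replicate m v ++ ys))
          = 1 + pvCnt (List.replicate m v ++ ys) := by simp [pvCnt]
      rw [hstep, hm, h3]
      push_cast; ring

-- the B fold step / finish, named for the proofs (identical to the lambda in the port of B)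
def pvStepB (st : Int × Int × Option Int) (x : Int) : Int × Int × Option Int :=
  if st.2.1 > 0 ∧ some x = st.2.2 then (st.1, st.2.1 + 1, st.2.2)
  else (st.1 + PySem.Int.floordiv st.2.1 3, 1, some x)

def pvFin (st : Int × Int × Option Int) : Int := st.1 + PySem.Int.floordiv st.2.1 3

-- the B fold with a live run (run = r ≥ 1, prev = some v)
lemma pvFoldB (xs : List Int) : ∀ (total : Int) (r : Nat) (v : Int), 1 ≤ r →
    pvFin (xs.foldl pvStepB (total, (r : Int), some v))
      = total + pvCnt (List.replicate r v ++ xs) := by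
  induction xs with
  | nil =>
    intro total r v hr
    simp only [List.foldl_nil, pvFin]
    rw [pvCnt_run r v [] (by simp), pvFloor3]
    simp [pvCnt]
  | cons x xs ih =>
    intro total r v hr
    by_cases hxv : x = v
    · subst hxv
      have hstep : pvStepB (total, (r : Int), some x) x = (total, ((r + 1 : Nat) : Int), some x) := by
        unfold pvStepB
        rw [if_pos (show ((total, (r : Int), some x).2.1 > 0 ∧ some x = (total, (r : Int), some x).2.2)
              from ⟨show (0 : Int) < (r : Int) by exact_mod_cast hr, rfl⟩)]
        push_cast
        rfl
      rw [List.foldl_cons, hstep, ih total (r + 1) x (by omega)]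
      congr 1
      rw [List.replicate_succ']
      simp
    · have hcond : ¬ (((r : Int) > 0) ∧ (some x : Option Int) = some v) := by
        intro h
        exact hxv (Option.some_injective _ h.2)
      have hstep : pvStepB (total, (r : Int), some v) x
          = (total + PySem.Int.floordiv (r : Int) 3, ((1 : Nat) : Int), some x) := by
        simp only [pvStepB, if_neg hcond]
        norm_num
      have hhead : ∀ y : Int, (x :: xs).head? = some y → y ≠ v := by
        intro y hyy
        simp only [List.head?_cons, Option.some.injEq] at hyy
        subst hyy; exact hxv
      rw [List.foldl_cons, hstep, ih (total + PySem.Int.floordiv (r : Int) 3) 1 x (by omega)]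
      rw [pvCnt_run r v (x :: xs) hhead, pvFloor3]
      simp only [List.replicate_one, List.cons_append, List.nil_append]
      ring

-- drop n as explicit three-element head when n + 2 < length
lemma pvLoopA_eq (array : List Int) (k : Nat) : ∀ (n : Nat) (count : Int),
    array.length ≤ n + k →
    pvLoopA array (n : Int) count = count + pvCnt (array.drop n) := by
  induction k with
  | zero =>
    intro n count h
    rw [pvLoopA, if_neg (by omega), pvCnt_short (array.drop n) (by simp; omega)]
    ring
  | succ k ih =>
    intro n count h
    by_cases hlt : (n : Int) < (array.length : Int) - 2
    · have hn2 : n + 2 < array.length := by omega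
      have hn1 : n + 1 < array.length := by omega
      have hn0 : n < array.length := by omega
      have g0 : PySem.List.pyGet? array (n : Int) = some array[n] := by
        rw [PySem.List.pyGet?_natCast, List.getElem?_eq_getElem hn0]
      have g1 : PySem.List.pyGet? array ((n : Int) + 1) = some array[n + 1] := by
        have e : ((n : Int) + 1) = ((n + 1 : Nat) : Int) := by push_cast; ring
        rw [e, PySem.List.pyGet?_natCast, List.getElem?_eq_getElem hn1]
      have g2 : PySem.List.pyGet? array ((n : Int) + 2) = some array[n + 2] := by
        have e : ((n : Int) + 2) = ((n + 2 : Nat) : Int) := by push_cast; ring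
        rw [e, PySem.List.pyGet?_natCast, List.getElem?_eq_getElem hn2]
      have hdrop : array.drop n = array[n] :: array[n + 1] :: array[n + 2] :: array.drop (n + 3) := by
        rw [List.drop_eq_getElem_cons hn0, List.drop_eq_getElem_cons hn1,
            List.drop_eq_getElem_cons hn2]
      rw [pvLoopA, if_pos hlt, g0, g1, g2, hdrop]
      set a := array[n]
      set b := array[n + 1]
      set c := array[n + 2]
      by_cases h1 : a = b ∧ b = c
      · have e3 : ((n : Int) + 3) = ((n + 3 : Nat) : Int) := by push_cast; ring
        simp only [if_pos h1, e3, pvCnt, ih (n + 3) (count + 1) (by omega)]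
        ring
      · by_cases h2 : a = b
        · have hbc : b ≠ c := fun hc => h1 ⟨h2, hc⟩
          have hp : a = b ∧ b ≠ c := ⟨h2, hbc⟩
          have e2 : ((n : Int) + 2) = ((n + 2 : Nat) : Int) := by push_cast; ring
          simp only [if_neg h1, if_pos hp, e2, ih (n + 2) count (by omega)]
          have hd2 : array.drop (n + 2) = c :: array.drop (n + 3) := by
            rw [List.drop_eq_getElem_cons hn2]
          rw [hd2]
          simp [pvCnt, hbc, h2]
        · have e1 : ((n : Int) + 1) = ((n + 1 : Nat) : Int) := by push_cast; ring
          have hnand : ¬ (a = b ∧ b ≠ c) := fun hc => h2 hc.1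
          simp only [if_neg h1, if_neg hnand, if_pos h2, e1, ih (n + 1) count (by omega)]
          have hd1 : array.drop (n + 1) = b :: c :: array.drop (n + 3) := by
            rw [List.drop_eq_getElem_cons hn1, List.drop_eq_getElem_cons hn2]
          rw [hd1]
          simp [pvCnt, h2]
    · rw [pvLoopA, if_neg hlt, pvCnt_short (array.drop n) (by simp; omega)]
      ring

lemma pvA_eq_cnt (array : List Int) : get_own_count array = pvCnt array := by
  have h := pvLoopA_eq array array.length 0 0 (by omega)
  simpa [get_own_count] using h

lemma pvB_eq_cnt (array : List Int) : get_own_count_alt array = pvCnt array := by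
  match array with
  | [] => rfl
  | x :: xs =>
    have hport : get_own_count_alt (x :: xs)
        = pvFin (xs.foldl pvStepB (pvStepB ((0 : Int), (0 : Int), (none : Option Int)) x)) := rfl
    have hstep : pvStepB ((0 : Int), (0 : Int), (none : Option Int)) x
        = ((0 : Int), ((1 : Nat) : Int), some x) := by
      simp only [pvStepB]
      norm_num
    have h := pvFoldB xs 0 1 x (by omega)
    simp only [List.replicate_one, List.cons_append, List.nil_append] at h
    rw [hport, hstep, h]
    ring

-- ===== VERDICT (by name: the statement is the Claim_ definition above) =====
theorem get_own_count_spec : Claim_equal_get_own_count := by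
  intro array _
  unfold Spec_get_own_count
  rw [pvA_eq_cnt, pvB_eq_cnt]
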